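-- pv_equiv track=rewrite | github.com/Gen-Spider/Pass-Bot | 28102025.py | _generate_number_patterns
-- ===== SOURCE A (Python) =====
-- from typing import List, Set, Optional, Dict, Tuple
--
-- def _generate_number_patterns(pattern: str) -> List[str]:
--     """Generate systematic number patterns (00/000/0000)"""
--     patterns = set()
--
--     if pattern == "00":
--         # Generate 00-99
--         for i in range(100):
--             patterns.add(f"{i:02d}")
--     elif pattern == "000":
--         # Generate 000-999
--         for i in range(1000):
--             patterns.add(f"{i:03d}")
--     elif pattern == "0000":
--         # Generate 0000-9999
--         for i in range(10000):
--             patterns.add(f"{i:04d}")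
--
--     return sorted(list(patterns))
-- ===== SOURCE B (Python) =====
-- def _generate_number_patterns(pattern):
--     """Generate systematic number patterns (00/000/0000)"""
--     if pattern not in ("00", "000", "0000"):
--         return []
--     out = [""]
--     for _ in pattern:
--         out = [s + d for s in out for d in "0123456789"]
--     return out
-- ===== Notes on version B (the rewrite author's own statement) =====
-- stated objective: simpler
-- what changed: B replaces A's three count-format branches with set-insertion and a final sort by a single width-driven Cartesian digit expansion that emits the fixed-width strings directly in sorted order with no formatting, no set and no sort.
import Mathlib
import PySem

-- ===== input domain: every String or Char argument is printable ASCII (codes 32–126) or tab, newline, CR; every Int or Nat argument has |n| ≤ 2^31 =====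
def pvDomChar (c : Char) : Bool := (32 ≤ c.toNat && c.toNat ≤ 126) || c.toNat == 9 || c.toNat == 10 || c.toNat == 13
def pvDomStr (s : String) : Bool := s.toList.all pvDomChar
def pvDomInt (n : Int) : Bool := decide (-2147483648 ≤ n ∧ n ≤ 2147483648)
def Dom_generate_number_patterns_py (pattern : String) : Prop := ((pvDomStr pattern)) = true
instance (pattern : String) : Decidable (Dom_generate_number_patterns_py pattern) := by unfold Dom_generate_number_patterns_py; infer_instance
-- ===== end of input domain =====

-- B replaces A's count-format-insert-then-sort branches by one Cartesian digit expansion that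
-- emits the fixed-width strings directly in sorted order (objective: simpler; no set, no sort).

-- ===== PORT A =====
-- f"{i:0{w}d}" — exact for 0 ≤ i (A only formats numbers from range(...), all nonnegative;
-- Python's sign-aware zero padding for negative i is not modelled).
def pyFmt0 (w : Nat) (i : Int) : String :=
  let cs := PySem.Int.toChars i
  String.ofList (List.replicate (w - cs.length) '0' ++ cs)

def generate_number_patterns_py (pattern : String) : List String :=
  let patterns : PySem.Set String := PySem.Set.empty
  let patterns : PySem.Set String :=
    if pattern = "00" then
      (PySem.List.pyRange 0 100).foldl (fun s i => PySem.Set.add s (pyFmt0 2 i)) patterns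
    else if pattern = "000" then
      (PySem.List.pyRange 0 1000).foldl (fun s i => PySem.Set.add s (pyFmt0 3 i)) patterns
    else if pattern = "0000" then
      (PySem.List.pyRange 0 10000).foldl (fun s i => PySem.Set.add s (pyFmt0 4 i)) patterns
    else patterns
  PySem.List.sorted patterns (fun x => x)

-- ===== PORT B =====
def pyDigitChars : List Char := ['0','1','2','3','4','5','6','7','8','9']

def generate_number_patterns_py_alt (pattern : String) : List String :=
  if pattern = "00" ∨ pattern = "000" ∨ pattern = "0000" then
    (pattern.toList.foldl
      (fun out _ => out.flatMap (fun s => pyDigitChars.map (fun d => s ++ [d])))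
      [[]]).map String.ofList
  else []

-- ===== PRECONDITION & SPEC =====
def Spec_generate_number_patterns_py (pattern : String) (out : List String) : Prop := out = generate_number_patterns_py_alt pattern
instance (pattern : String) (out : List String) : Decidable (Spec_generate_number_patterns_py pattern out) := by unfold Spec_generate_number_patterns_py; infer_instance

-- ===== CLAIM (what is proved, stated in full; the proofs are below) =====
def Claim_equal_generate_number_patterns_py : Prop := ∀ (pattern : String), Dom_generate_number_patterns_py pattern → Spec_generate_number_patterns_py pattern (generate_number_patterns_py pattern)

-- ===== LEMMAS AND PROOFS =====

-- the w-digit Cartesian expansion, one level per character of the pattern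
def prodC : Nat → List (List Char)
  | 0 => [[]]
  | w+1 => (prodC w).flatMap (fun s => pyDigitChars.map (fun d => s ++ [d]))

-- zero-padding at the character level, on Nat
def padN (w : Nat) (n : Nat) : List Char :=
  List.replicate (w - (Nat.toDigits 10 n).length) '0' ++ Nat.toDigits 10 n

lemma padC_natCast (w : Nat) (n : Nat) :
    pyFmt0 w ((n : Nat) : Int) = String.ofList (padN w n) := by
  simp [pyFmt0, padN, PySem.Int.toChars, Int.not_lt.mpr (Int.natCast_nonneg n)]

-- ---- Nat.toDigits recurrence ----

lemma toDigitsCore_acc (b : Nat) (hb : 2 ≤ b) :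
    ∀ (f n : Nat) (acc : List Char), n < f →
      Nat.toDigitsCore b f n acc = Nat.toDigitsCore b f n [] ++ acc := by
  intro f
  induction f with
  | zero => intro n acc h; omega
  | succ f ih =>
    intro n acc h
    simp only [Nat.toDigitsCore]
    by_cases h0 : n / b = 0
    · simp [h0]
    · simp only [h0, if_false]
      have hn : 0 < n := by
        rcases Nat.eq_zero_or_pos n with h' | h'
        · exact absurd (by simp [h']) h0
        · exact h'
      have hlt : n / b < f := by
        have := Nat.div_lt_self hn (by omega : 1 < b)
        omega
      rw [ih (n / b) (Nat.digitChar (n % b) :: acc) hlt,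
          ih (n / b) [Nat.digitChar (n % b)] hlt]
      simp

lemma toDigitsCore_fuel (b : Nat) (hb : 2 ≤ b) :
    ∀ (f f' n : Nat), n < f → n < f' →
      Nat.toDigitsCore b f n [] = Nat.toDigitsCore b f' n [] := by
  intro f
  induction f with
  | zero => intro f' n h; omega
  | succ f ih =>
    intro f' n h h'
    cases f' with
    | zero => omega
    | succ f' =>
      simp only [Nat.toDigitsCore]
      by_cases h0 : n / b = 0
      · simp [h0]
      · simp only [h0, if_false]
        have hn : 0 < n := by
          rcases Nat.eq_zero_or_pos n with hz | hz
          · exact absurd (by simp [hz]) h0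
          · exact hz
        have hlt : n / b < f := by
          have := Nat.div_lt_self hn (by omega : 1 < b)
          omega
        have hlt' : n / b < f' := by
          have := Nat.div_lt_self hn (by omega : 1 < b)
          omega
        rw [toDigitsCore_acc b hb f (n / b) [Nat.digitChar (n % b)] hlt,
            toDigitsCore_acc b hb f' (n / b) [Nat.digitChar (n % b)] hlt',
            ih f' (n / b) hlt hlt']

lemma toDigits_rec (Q R : Nat) (hQ : 0 < Q) (hR : R < 10) :
    Nat.toDigits 10 (10 * Q + R) = Nat.toDigits 10 Q ++ [Nat.digitChar R] := by
  have hdiv : (10 * Q + R) / 10 = Q := by omega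
  have hmod : (10 * Q + R) % 10 = R := by omega
  have hne : (10 * Q + R) / 10 ≠ 0 := by omega
  simp only [Nat.toDigits, Nat.toDigitsCore, hdiv, hmod]
  rw [toDigitsCore_acc 10 (by norm_num) (10 * Q + R) Q [Nat.digitChar R] (by omega)]
  rw [toDigitsCore_fuel 10 (by norm_num) (10 * Q + R) (Q + 1) Q (by omega) (by omega)]
  conv_lhs => rw [Nat.toDigitsCore]
  rw [if_neg (by omega : ¬ Q = 0)]

lemma toDigits_single (R : Nat) (hR : R < 10) :
    Nat.toDigits 10 R = [Nat.digitChar R] := by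
  have h0 : R / 10 = 0 := by omega
  have h1 : R % 10 = R := by omega
  simp [Nat.toDigits, Nat.toDigitsCore, h0, h1]

lemma toDigits_len_le (w n : Nat) (hw : 0 < w) (hn : n < 10 ^ w) :
    (Nat.toDigits 10 n).length ≤ w :=
  Nat.toDigits_length 10 n w hw hn

-- padding recurrence: a (w+1)-width padded number splits into width-w prefix and last digit
lemma padN_rec (w Q R : Nat) (hw : 1 ≤ w) (hQ : Q < 10 ^ w) (hR : R < 10) :
    padN (w + 1) (10 * Q + R) = padN w Q ++ [Nat.digitChar R] := by
  rcases Nat.eq_zero_or_pos Q with h0 | h0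
  · subst h0
    simp only [mul_zero, zero_add, padN, toDigits_single R hR, toDigits_single 0 (by norm_num)]
    have hrep : List.replicate (w + 1 - 1) '0' = List.replicate (w - 1) '0' ++ ['0'] := by
      rw [← List.replicate_succ']
      congr 1
      omega
    simp only [List.length_singleton, hrep, List.append_assoc]
    rfl
  · rw [padN, padN, toDigits_rec Q R h0 hR]
    have hlen : (Nat.toDigits 10 Q).length ≤ w := toDigits_len_le w Q hw hQ
    simp only [List.length_append, List.length_singleton]
    have : w + 1 - ((Nat.toDigits 10 Q).length + 1) = w - (Nat.toDigits 10 Q).length := by omega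
    rw [this, List.append_assoc]

-- range(a*b) grouped b-major
lemma range_mul_flatMap (a b : Nat) :
    List.range (a * b) = (List.range a).flatMap (fun q => (List.range b).map (fun r => b * q + r)) := by
  induction a with
  | zero => simp
  | succ a ih =>
    rw [Nat.succ_mul, List.range_add, ih, List.range_succ, List.flatMap_append]
    simp [mul_comm]

-- the map/padN characterisation of the Cartesian expansion
lemma map_padN_eq_prodC : ∀ w : Nat, 1 ≤ w →
    (List.range (10 ^ w)).map (padN w) = prodC w := by
  intro w
  induction w with
  | zero => intro h; omega
  | succ w ih =>
    intro _
    rcases Nat.eq_zero_or_pos w with h0 | h0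
    · subst h0; decide
    · have hpow : (10 : Nat) ^ (w + 1) = 10 ^ w * 10 := by ring
      rw [hpow, range_mul_flatMap, List.map_flatMap, prodC, ← ih h0, List.flatMap_map]
      apply List.flatMap_congr
      intro q hq
      have hq' : q < 10 ^ w := List.mem_range.mp hq
      rw [List.map_map]
      have : pyDigitChars = (List.range 10).map Nat.digitChar := by decide
      rw [this, List.map_map]
      apply List.map_congr_left
      intro r hr
      exact padN_rec w q r h0 hq' (List.mem_range.mp hr)

-- ---- order facts ----

lemma len_mem_prodC : ∀ (w : Nat) (s : List Char), s ∈ prodC w → s.length = w := by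
  intro w
  induction w with
  | zero => intro s hs; simp [prodC] at hs; simp [hs]
  | succ w ih =>
    intro s hs
    simp only [prodC, List.mem_flatMap, List.mem_map] at hs
    obtain ⟨t, ht, d, _, rfl⟩ := hs
    simp [ih t ht]

lemma lex_append_same (s : List Char) (u v : List Char) (h : List.Lex (· < ·) u v) :
    List.Lex (· < ·) (s ++ u) (s ++ v) := by
  induction s with
  | nil => simpa
  | cons c s ih => exact List.Lex.cons ih

lemma lex_append_of_length_eq :
    ∀ (a b : List Char), a.length = b.length → List.Lex (· < ·) a b →
      ∀ (u v : List Char), List.Lex (· < ·) (a ++ u) (b ++ v) := by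
  intro a
  induction a with
  | nil => intro b hlen h u v; cases h <;> simp_all
  | cons x a ih =>
    intro b hlen h u v
    cases b with
    | nil => simp at hlen
    | cons y b =>
      cases h with
      | rel hxy => exact List.Lex.rel hxy
      | cons h' => exact List.Lex.cons (ih b (by simpa using hlen) h' u v)

lemma pairwise_lex_prodC : ∀ w : Nat, (prodC w).Pairwise (fun a b => List.Lex (· < ·) a b) := by
  intro w
  induction w with
  | zero => simp [prodC]
  | succ w ih =>
    rw [prodC, List.pairwise_flatMap]
    constructor
    · intro s _
      rw [List.pairwise_map]
      have hd : pyDigitChars.Pairwise (· < ·) := by decide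
      exact hd.imp (fun {d1 d2} h => lex_append_same s [d1] [d2] (List.Lex.rel h))
    · refine ih.imp_of_mem ?_
      intro s1 s2 hs1 hs2 h x hx y hy
      simp only [List.mem_map] at hx hy
      obtain ⟨d1, _, rfl⟩ := hx
      obtain ⟨d2, _, rfl⟩ := hy
      exact lex_append_of_length_eq s1 s2
        (by rw [len_mem_prodC w s1 hs1, len_mem_prodC w s2 hs2]) h [d1] [d2]

lemma pairwise_lt_map_mk (w : Nat) :
    ((prodC w).map String.ofList).Pairwise (fun a b => a < b) := by
  rw [List.pairwise_map]
  refine (pairwise_lex_prodC w).imp ?_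
  intro a b h
  rw [String.lt_iff_toList_lt]
  simp only [String.toList_ofList]
  exact (List.lt_iff_lex_lt a b).mpr h

-- ---- set-building collapses on a Nodup list ----

lemma foldl_add_eq_append {α : Type} [BEq α] [LawfulBEq α] :
    ∀ (xs acc : List α), xs.Nodup → (∀ x ∈ xs, x ∉ acc) →
      xs.foldl PySem.Set.add acc = acc ++ xs := by
  intro xs
  induction xs with
  | nil => simp
  | cons x xs ih =>
    intro acc hnd hdisj
    have hx : x ∉ acc := hdisj x List.mem_cons_self
    have : PySem.Set.add acc x = acc ++ [x] := by
      simp only [PySem.Set.add, PySem.Set.contains]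
      rw [if_neg (by simpa [List.contains_iff_mem] using hx)]
    rw [List.foldl_cons, this, ih (acc ++ [x]) (List.Nodup.of_cons hnd)]
    · simp
    · intro y hy
      simp only [List.mem_append, List.mem_singleton]
      rintro (hya | rfl)
      · exact hdisj y (List.mem_cons_of_mem x hy) hya
      · exact (List.nodup_cons.mp hnd).1 hy

-- the per-branch computation: A's branch of width w equals B's expansion of width w
lemma branch_eq (w : Nat) (hw : 1 ≤ w) :
    PySem.List.sorted
        ((PySem.List.pyRange 0 ((10 ^ w : Nat) : Int)).foldl
          (fun s i => PySem.Set.add s (pyFmt0 w i)) PySem.Set.empty)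
        (fun x => x)
      = (prodC w).map String.ofList := by
  have hmap : (PySem.List.pyRange 0 ((10 ^ w : Nat) : Int)).map (pyFmt0 w)
      = (prodC w).map String.ofList := by
    rw [PySem.List.pyRange_zero_nat, List.map_map]
    have : (pyFmt0 w) ∘ (fun k : Nat => (k : Int)) = (fun n => String.ofList (padN w n)) := by
      funext n; exact padC_natCast w n
    rw [this]
    have := map_padN_eq_prodC w hw
    calc (List.range (10 ^ w)).map (fun n => String.ofList (padN w n))
        = ((List.range (10 ^ w)).map (padN w)).map String.ofList := by rw [List.map_map]; rfl
      _ = (prodC w).map String.ofList := by rw [this]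
  have hpw : ((prodC w).map String.ofList).Pairwise (fun a b => a < b) := pairwise_lt_map_mk w
  have hnd : ((prodC w).map String.ofList).Nodup := hpw.imp (fun h => ne_of_lt h)
  have hfold : (PySem.List.pyRange 0 ((10 ^ w : Nat) : Int)).foldl
      (fun s i => PySem.Set.add s (pyFmt0 w i)) PySem.Set.empty
      = (prodC w).map String.ofList := by
    have : (PySem.List.pyRange 0 ((10 ^ w : Nat) : Int)).foldl
        (fun s i => PySem.Set.add s (pyFmt0 w i)) PySem.Set.empty
        = ((PySem.List.pyRange 0 ((10 ^ w : Nat) : Int)).map (pyFmt0 w)).foldl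
            PySem.Set.add [] := by
      rw [List.foldl_map]; rfl
    rw [this, hmap, foldl_add_eq_append _ [] hnd (by simp)]
    simp
  simp only [hfold]
  exact PySem.List.sorted_eq_of_perm_of_pairwise_lt _ _ _ (List.Perm.refl _) hpw

-- B's fold on each accepted literal computes the expansion
lemma fold_step (l : List Char) : ∀ w : Nat,
    List.foldl (fun out _ => out.flatMap (fun s => pyDigitChars.map (fun d => s ++ [d])))
      (prodC w) l = prodC (w + l.length) := by
  induction l with
  | nil => intro w; simp
  | cons c l ih =>
    intro w
    have h1 : (prodC w).flatMap (fun s => pyDigitChars.map (fun d => s ++ [d])) = prodC (w + 1) := rfl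
    simp only [List.foldl_cons, h1, ih (w + 1), List.length_cons]
    congr 1
    omega

lemma alt_eq_prodC (pattern : String) (w : Nat)
    (h : pattern.toList.length = w)
    (hmem : pattern = "00" ∨ pattern = "000" ∨ pattern = "0000") :
    generate_number_patterns_py_alt pattern = (prodC w).map String.ofList := by
  unfold generate_number_patterns_py_alt
  rw [if_pos hmem]
  have h0 : ([[]] : List (List Char)) = prodC 0 := rfl
  rw [h0, fold_step pattern.toList 0, Nat.zero_add, h]

-- ===== VERDICT (by name: the statement is the Claim_ definition above) =====
theorem generate_number_patterns_py_spec : Claim_equal_generate_number_patterns_py := by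
  intro pattern _
  unfold Spec_generate_number_patterns_py
  by_cases h2 : pattern = "00"
  · subst h2
    rw [alt_eq_prodC "00" 2 (by decide) (Or.inl rfl)]
    have h100 : ((10 ^ 2 : Nat) : Int) = 100 := by norm_num
    have := branch_eq 2 (by norm_num)
    rw [h100] at this
    calc generate_number_patterns_py "00"
        = PySem.List.sorted
            ((PySem.List.pyRange 0 100).foldl
              (fun s i => PySem.Set.add s (pyFmt0 2 i)) PySem.Set.empty)
            (fun x => x) := rfl
      _ = (prodC 2).map String.ofList := this
  · by_cases h3 : pattern = "000"
    · subst h3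
      rw [alt_eq_prodC "000" 3 (by decide) (Or.inr (Or.inl rfl))]
      have h1000 : ((10 ^ 3 : Nat) : Int) = 1000 := by norm_num
      have := branch_eq 3 (by norm_num)
      rw [h1000] at this
      calc generate_number_patterns_py "000"
          = PySem.List.sorted
              ((PySem.List.pyRange 0 1000).foldl
                (fun s i => PySem.Set.add s (pyFmt0 3 i)) PySem.Set.empty)
              (fun x => x) := rfl
        _ = (prodC 3).map String.ofList := this
    · by_cases h4 : pattern = "0000"
      · subst h4
        rw [alt_eq_prodC "0000" 4 (by decide) (Or.inr (Or.inr rfl))]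
        have h10000 : ((10 ^ 4 : Nat) : Int) = 10000 := by norm_num
        have := branch_eq 4 (by norm_num)
        rw [h10000] at this
        calc generate_number_patterns_py "0000"
            = PySem.List.sorted
                ((PySem.List.pyRange 0 10000).foldl
                  (fun s i => PySem.Set.add s (pyFmt0 4 i)) PySem.Set.empty)
                (fun x => x) := rfl
          _ = (prodC 4).map String.ofList := this
      · simp only [generate_number_patterns_py, generate_number_patterns_py_alt,
          if_neg h2, if_neg h3, if_neg h4, if_neg (show ¬(pattern = "00" ∨ pattern = "000" ∨ pattern = "0000") by tauto)]
        rfl
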